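-- pv_equiv track=rewrite | github.com/arielmls/sentimental-subphrases | index.py | get_string_permutations
-- ===== SOURCE A (Python) =====
-- def get_string_permutations(l):
--     permutations = []
--     for i in range(len(l)):
--         elem = ""
--         for j in range(len(l) - i):
--             elem += " " + l[i + j]
--             permutations.append(elem)
--     return permutations
-- ===== SOURCE B (Python) =====
-- def get_string_permutations(l):
--     return [" " + " ".join(l[i:j + 1])
--             for i in range(len(l))
--             for j in range(i, len(l))]
-- ===== Notes on version B (the rewrite author's own statement) =====
-- stated objective: simpler
-- what changed: Replaced the running string accumulator ('elem' extended word by word inside the nested loops) by a stateless double comprehension that rebuilds each phrase from scratch with a slice and ' '.join.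
import Mathlib
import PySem

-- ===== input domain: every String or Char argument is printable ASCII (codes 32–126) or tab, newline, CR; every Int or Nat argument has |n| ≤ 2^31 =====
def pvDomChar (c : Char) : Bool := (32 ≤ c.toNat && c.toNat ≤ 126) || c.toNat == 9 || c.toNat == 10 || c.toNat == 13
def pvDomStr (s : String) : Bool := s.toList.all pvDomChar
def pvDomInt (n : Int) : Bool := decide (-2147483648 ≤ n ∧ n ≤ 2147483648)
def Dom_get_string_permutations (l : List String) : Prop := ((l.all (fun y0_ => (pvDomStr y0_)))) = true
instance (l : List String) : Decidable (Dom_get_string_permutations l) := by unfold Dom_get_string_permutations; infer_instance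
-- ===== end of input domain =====

-- B replaces A's running accumulator `elem` by a stateless double comprehension that
-- rebuilds each phrase from a slice with " ".join (objective: simpler; same cost).

-- ===== PORT A =====
def get_string_permutations (l : List String) : List String :=
  (PySem.List.pyRange 0 (l.length : Int) 1).foldl
    (fun permutations i =>
      ((PySem.List.pyRange 0 ((l.length : Int) - i) 1).foldl
        (fun (st : String × List String) j =>
          let elem := st.1 ++ " " ++ PySem.List.pyGetD l (i + j) ""
          (elem, st.2 ++ [elem]))
        ("", permutations)).2)
    []

-- ===== PORT B =====
def get_string_permutations_alt (l : List String) : List String :=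
  (PySem.List.pyRange 0 (l.length : Int) 1).flatMap (fun i =>
    (PySem.List.pyRange i (l.length : Int) 1).map (fun j =>
      " " ++ PySem.Str.join " " (PySem.List.slice l (some i) (some (j + 1)))))

-- ===== PRECONDITION & SPEC =====
def Spec_get_string_permutations (l : List String) (out : List String) : Prop := out = get_string_permutations_alt l
instance (l : List String) (out : List String) : Decidable (Spec_get_string_permutations l out) := by unfold Spec_get_string_permutations; infer_instance

-- ===== CLAIM (what is proved, stated in full; the proofs are below) =====
def Claim_equal_get_string_permutations : Prop := ∀ (l : List String), Dom_get_string_permutations l → Spec_get_string_permutations l (get_string_permutations l)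

-- ===== LEMMAS AND PROOFS =====

-- the string A's inner loop has accumulated after t iterations, for outer index i
def pvPref (l : List String) (i : Nat) : Nat → String
  | 0 => ""
  | t+1 => pvPref l i t ++ " " ++ PySem.List.pyGetD l ((i : Int) + (t : Int)) ""

theorem pv_chars_join_append_singleton (sep x : List Char) :
    ∀ (xs : List (List Char)), xs ≠ [] →
      PySem.Chars.join sep (xs ++ [x]) = PySem.Chars.join sep xs ++ sep ++ x := by
  intro xs
  induction xs with
  | nil => intro h; exact absurd rfl h
  | cons a as ih =>
    intro _
    cases as with
    | nil =>
        simp [PySem.Chars.join_singleton, PySem.Chars.join_cons_cons]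
    | cons b bs =>
        have ih' : PySem.Chars.join sep (b :: (bs ++ [x]))
            = PySem.Chars.join sep (b :: bs) ++ sep ++ x := ih (by simp)
        simp only [List.cons_append, PySem.Chars.join_cons_cons, ih']
        simp [List.append_assoc]

theorem pv_str_join_append_singleton (xs : List String) (x : String) (h : xs ≠ []) :
    PySem.Str.join " " (xs ++ [x]) = PySem.Str.join " " xs ++ " " ++ x := by
  apply String.toList_inj.mp
  have hmap : (xs.map String.toList) ≠ [] := by simpa using h
  simp [PySem.Str.toList_join, pv_chars_join_append_singleton _ _ _ hmap]

theorem pv_str_join_singleton (x : String) :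
    PySem.Str.join " " [x] = x := by
  apply String.toList_inj.mp
  simp [PySem.Str.toList_join, PySem.Chars.join_singleton]

theorem pvPref_eq_join (l : List String) (i : Nat) :
    ∀ (t : Nat), i + t < l.length →
      pvPref l i (t+1) = " " ++ PySem.Str.join " " ((l.drop i).take (t+1)) := by
  intro t
  induction t with
  | zero =>
      intro h
      have hi : i < l.length := by omega
      have hdrop : l.drop i = l[i] :: l.drop (i+1) := List.drop_eq_getElem_cons hi
      have hget : PySem.List.pyGetD l ((i : Int) + (0 : Int)) "" = l[i] := by
        simp [PySem.List.pyGetD_natCast, List.getElem?_eq_getElem hi]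
      have h1 : pvPref l i 1 = "" ++ " " ++ PySem.List.pyGetD l ((i : Int) + (0 : Int)) "" := rfl
      rw [h1, hget]
      have htake1 : List.take 1 (List.drop i l) = [l[i]] := by rw [hdrop]; rfl
      rw [htake1, pv_str_join_singleton]
      simp
  | succ t ih =>
      intro h
      have ht : i + t < l.length := by omega
      have hlen : t + 1 < (l.drop i).length := by simp [List.length_drop]; omega
      have htake : (l.drop i).take (t+2) = (l.drop i).take (t+1) ++ [(l.drop i)[t+1]] := by
        rw [List.take_add_one]
        simp [List.getElem?_eq_getElem hlen]
      have hne : (l.drop i).take (t+1) ≠ [] := by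
        have : ((l.drop i).take (t+1)).length = t+1 := by
          simp [List.length_take, List.length_drop]; omega
        intro hn; rw [hn] at this; simp at this
      have hgetel : (l.drop i)[t+1] = l[i + (t+1)]'(by omega) := by
        simp [List.getElem_drop]
      have hget : PySem.List.pyGetD l ((i : Int) + ((t+1 : Nat) : Int)) "" = l[i + (t+1)]'(by omega) := by
        have hc : (i : Int) + ((t+1 : Nat) : Int) = ((i + (t+1) : Nat) : Int) := by push_cast; ring
        rw [hc, PySem.List.pyGetD_natCast]
        simp [List.getElem?_eq_getElem (show i + (t+1) < l.length by omega)]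
      calc pvPref l i (t+2)
          = pvPref l i (t+1) ++ " " ++ PySem.List.pyGetD l ((i : Int) + ((t+1 : Nat) : Int)) "" := rfl
        _ = (" " ++ PySem.Str.join " " ((l.drop i).take (t+1))) ++ " " ++ l[i + (t+1)]'(by omega) := by
              rw [ih ht, hget]
        _ = " " ++ PySem.Str.join " " ((l.drop i).take (t+2)) := by
              rw [htake, pv_str_join_append_singleton _ _ hne, hgetel]
              simp [String.append_assoc]

-- A's inner loop, rephrased over List.range, accumulates pvPref and appends each prefix
theorem pv_innerA (l : List String) (i : Nat) :
    ∀ (m : Nat) (acc : List String),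
      (List.range m).foldl
        (fun (st : String × List String) (k : Nat) =>
          (st.1 ++ " " ++ PySem.List.pyGetD l ((i : Int) + (k : Int)) "",
           st.2 ++ [st.1 ++ " " ++ PySem.List.pyGetD l ((i : Int) + (k : Int)) ""]))
        ("", acc)
      = (pvPref l i m, acc ++ (List.range m).map (fun t => pvPref l i (t+1))) := by
  intro m acc
  induction m with
  | zero => simp [pvPref]
  | succ m ih =>
      rw [List.range_succ, List.foldl_append, ih]
      simp [pvPref, List.append_assoc]

-- A's outer loop is a flatMap of the inner emissions
theorem pv_outerA (l : List String) :
    ∀ (m : Nat) (acc : List String),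
      (List.range m).foldl
        (fun acc i =>
          ((List.range (l.length - i)).foldl
            (fun (st : String × List String) (k : Nat) =>
              (st.1 ++ " " ++ PySem.List.pyGetD l ((i : Int) + (k : Int)) "",
               st.2 ++ [st.1 ++ " " ++ PySem.List.pyGetD l ((i : Int) + (k : Int)) ""]))
            ("", acc)).2)
        acc
      = acc ++ (List.range m).flatMap
          (fun i => (List.range (l.length - i)).map (fun t => pvPref l i (t+1))) := by
  intro m acc
  induction m generalizing acc with
  | zero => simp
  | succ m ih =>
      rw [List.range_succ, List.foldl_append, ih]
      simp [pv_innerA, List.append_assoc]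

theorem pv_portA_eq (l : List String) :
    get_string_permutations l
      = (List.range l.length).flatMap
          (fun i => (List.range (l.length - i)).map (fun t => pvPref l i (t+1))) := by
  unfold get_string_permutations
  rw [PySem.List.pyRange_one]
  simp only [Int.sub_zero, Int.toNat_natCast, List.foldl_map]
  have hcongr :
      (List.range l.length).foldl
        (fun permutations (k : Nat) =>
          ((PySem.List.pyRange 0 ((l.length : Int) - (0 + (k : Int))) 1).foldl
            (fun (st : String × List String) j =>
              (st.1 ++ " " ++ PySem.List.pyGetD l ((0 + (k : Int)) + j) "",
               st.2 ++ [st.1 ++ " " ++ PySem.List.pyGetD l ((0 + (k : Int)) + j) ""]))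
            ("", permutations)).2) []
      = (List.range l.length).foldl
        (fun acc i =>
          ((List.range (l.length - i)).foldl
            (fun (st : String × List String) (k : Nat) =>
              (st.1 ++ " " ++ PySem.List.pyGetD l ((i : Int) + (k : Int)) "",
               st.2 ++ [st.1 ++ " " ++ PySem.List.pyGetD l ((i : Int) + (k : Int)) ""]))
            ("", acc)).2) [] := by
    apply PySem.List.foldl_congr_mem
    intro acc i hi
    have hi' : i < l.length := List.mem_range.mp hi
    have hto : (((l.length : Int) - (i : Int)).toNat) = l.length - i := by omega
    rw [PySem.List.pyRange_one]
    simp [List.foldl_map, hto, zero_add]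
  rw [hcongr, pv_outerA]
  simp

theorem pv_flatMap_congr {α β : Type} (xs : List α) (f g : α → List β)
    (h : ∀ x ∈ xs, f x = g x) : xs.flatMap f = xs.flatMap g := by
  induction xs with
  | nil => rfl
  | cons a as ih =>
      simp only [List.flatMap_cons]
      rw [h a (by simp), ih (fun x hx => h x (by simp [hx]))]

theorem pv_portB_eq (l : List String) :
    get_string_permutations_alt l
      = (List.range l.length).flatMap
          (fun i => (List.range (l.length - i)).map (fun t => pvPref l i (t+1))) := by
  unfold get_string_permutations_alt
  rw [PySem.List.pyRange_one]
  simp only [Int.sub_zero, Int.toNat_natCast, List.flatMap_map, zero_add]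
  refine pv_flatMap_congr _ _ _ ?_
  intro i hi
  have hi' : i < l.length := List.mem_range.mp hi
  have hto : (((l.length : Int) - ((i : Nat) : Int)).toNat) = l.length - i := by omega
  rw [PySem.List.pyRange_one]
  simp only [List.map_map]
  rw [hto]
  apply List.map_congr_left
  intro t ht
  have ht' : t < l.length - i := List.mem_range.mp ht
  have hb : i + t < l.length := by omega
  simp only [Function.comp_apply]
  have h2 : ((i : Nat) : Int) + ((t : Nat) : Int) + 1 = ((i : Nat) : Int) + (((t+1 : Nat)) : Int) := by
    push_cast; ring
  rw [h2, PySem.List.slice_natCast_add, ← pvPref_eq_join l i t hb]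

-- ===== VERDICT (by name: the statement is the Claim_ definition above) =====
theorem get_string_permutations_spec : Claim_equal_get_string_permutations := by
  intro l _
  unfold Spec_get_string_permutations
  rw [pv_portA_eq, pv_portB_eq]
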